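-- pv_equiv track=rewrite | github.com/vonvic/Advent-Of-Code-2022-Python | 08/problem.py | find_all_visible_from_top
-- ===== SOURCE A (Python) =====
-- def find_all_visible_from_top(mat: list[list[int]]) -> set[tuple[int, int]]:
--     visible: set[tuple[int, int]] = set()
--
--     n = len(mat)
--     m = len(mat[0])
--
--     for i in range(m):
--         cur_max = -1
--         for j in range(n):
--             cur_val = mat[j][i]
--             if cur_val > cur_max:
--                 cur_max = cur_val
--                 visible.add((j, i))
--
--     return visible
-- ===== SOURCE B (Python) =====
-- def find_all_visible_from_top(mat: list[list[int]]) -> set[tuple[int, int]]: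
--     visible: set[tuple[int, int]] = set()
--     for i in range(len(mat[0])):
--         col = [row[i] for row in mat]
--         pm = [-1]
--         for v in col:
--             pm.append(v if v > pm[-1] else pm[-1])
--         visible.update((j, i) for j, v in enumerate(col) if v > pm[j])
--     return visible
-- ===== Notes on version B (the rewrite author's own statement) =====
-- stated objective: alternative
-- what changed: B materialises each column and its exclusive prefix-maxima array, then selects the visible cells with a filter over enumerate, instead of A's nested index loops with a scalar running maximum and per-element set.add.
import Mathlib
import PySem

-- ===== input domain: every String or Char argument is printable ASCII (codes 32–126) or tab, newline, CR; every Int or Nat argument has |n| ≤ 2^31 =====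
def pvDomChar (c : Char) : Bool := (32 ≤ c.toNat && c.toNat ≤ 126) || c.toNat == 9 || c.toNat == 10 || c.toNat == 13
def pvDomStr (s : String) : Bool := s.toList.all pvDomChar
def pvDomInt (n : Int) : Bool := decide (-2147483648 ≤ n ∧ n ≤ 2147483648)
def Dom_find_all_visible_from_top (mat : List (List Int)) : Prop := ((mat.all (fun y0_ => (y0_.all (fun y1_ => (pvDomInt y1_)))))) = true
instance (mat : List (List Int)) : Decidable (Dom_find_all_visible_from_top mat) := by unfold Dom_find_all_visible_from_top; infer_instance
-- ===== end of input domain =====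

-- B replaces A's nested index loops with a scalar running maximum by, per column, an explicit
-- prefix-maxima array and a filter over the enumerated column; same cost, different decomposition.


-- ===== PORT A =====
def find_all_visible_from_top (mat : List (List Int)) : List (Int × Int) :=
  let n : Int := mat.length
  let m : Int := (PySem.List.pyGetD mat 0 []).length
  (PySem.List.pyRange 0 m 1).foldl
    (fun visible i =>
      ((PySem.List.pyRange 0 n 1).foldl
        (fun (st : Int × List (Int × Int)) j =>
          let cur_val := PySem.List.pyGetD (PySem.List.pyGetD mat j []) i 0
          if cur_val > st.1 then (cur_val, PySem.Set.add st.2 (j, i)) else st)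
        (-1, visible)).2)
    []

-- ===== PORT B =====
def find_all_visible_from_top_alt (mat : List (List Int)) : List (Int × Int) :=
  (PySem.List.pyRange 0 ((PySem.List.pyGetD mat 0 []).length : Int) 1).foldl
    (fun visible i =>
      let col : List Int := mat.map (fun row => PySem.List.pyGetD row i 0)
      let pm : List Int := col.foldl
        (fun pm v =>
          pm ++ [if v > PySem.List.pyGetD pm (-1) 0 then v else PySem.List.pyGetD pm (-1) 0])
        [-1]
      PySem.Set.update visible
        (((PySem.List.enumerate col 0).filter (fun p => p.2 > PySem.List.pyGetD pm p.1 0)).map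
          (fun p => (p.1, i))))
    []

-- ===== PRECONDITION & SPEC =====
-- Pre_: the Python A raises IndexError on an empty matrix (mat[0]) and on a row shorter than the
-- first row (mat[j][i]); exactly those inputs are excluded (Python B raises on the same inputs).
def Pre_find_all_visible_from_top (mat : List (List Int)) : Prop :=
  mat ≠ [] ∧ ∀ row ∈ mat, mat.headI.length ≤ row.length
instance (mat : List (List Int)) : Decidable (Pre_find_all_visible_from_top mat) := by unfold Pre_find_all_visible_from_top; infer_instance

def pvWitness_find_all_visible_from_top : List (List Int) := [[1, 2], [3, 0]]

def Spec_find_all_visible_from_top (mat : List (List Int)) (out : List (Int × Int)) : Prop := out = find_all_visible_from_top_alt mat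
instance (mat : List (List Int)) (out : List (Int × Int)) : Decidable (Spec_find_all_visible_from_top mat out) := by unfold Spec_find_all_visible_from_top; infer_instance

-- ===== CLAIM (what is proved, stated in full; the proofs are below) =====
def Claim_equal_find_all_visible_from_top : Prop := ∀ (mat : List (List Int)), Dom_find_all_visible_from_top mat → Pre_find_all_visible_from_top mat → Spec_find_all_visible_from_top mat (find_all_visible_from_top mat)

-- ===== LEMMAS AND PROOFS =====

-- running maximum step
def gmax (a v : Int) : Int := if v > a then v else a

-- the cells of one column (with column index i) that a top-down scan with running max c,
-- starting at row j0, reports visible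
def sel (i : Int) : List Int → Int → Int → List (Int × Int)
  | [], _, _ => []
  | v :: rest, c, j => if v > c then (j, i) :: sel i rest v (j + 1) else sel i rest c (j + 1)

theorem mem_sel {i : Int} : ∀ {col : List Int} {c j0 : Int} {p : Int × Int},
    p ∈ sel i col c j0 → p.2 = i ∧ j0 ≤ p.1
  | [], _, _, _, h => by simp [sel] at h
  | v :: rest, c, j0, p, h => by
    unfold sel at h
    split at h
    · rcases List.mem_cons.1 h with h | h
      · subst h; exact ⟨rfl, le_refl _⟩
      · have := mem_sel h; exact ⟨this.1, by omega⟩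
    · have := mem_sel h; exact ⟨this.1, by omega⟩

theorem nodup_sel {i : Int} : ∀ (col : List Int) (c j0 : Int), (sel i col c j0).Nodup
  | [], _, _ => List.nodup_nil
  | v :: rest, c, j0 => by
    unfold sel
    split
    · refine List.nodup_cons.2 ⟨fun h => ?_, nodup_sel rest v (j0 + 1)⟩
      have := mem_sel h; omega
    · exact nodup_sel rest c (j0 + 1)

-- A's inner loop, phrased over the enumerated column
theorem innerA (i : Int) : ∀ (col : List Int) (c j0 : Int) (vis : List (Int × Int)),
    (∀ j : Int, j0 ≤ j → (j, i) ∉ vis) →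
    (PySem.List.enumerate col j0).foldl
      (fun (st : Int × List (Int × Int)) p =>
        if p.2 > st.1 then (p.2, PySem.Set.add st.2 (p.1, i)) else st)
      (c, vis)
    = (col.foldl gmax c, vis ++ sel i col c j0)
  | [], c, j0, vis, _ => by simp [PySem.List.enumerate_nil, sel]
  | v :: rest, c, j0, vis, h => by
    rw [PySem.List.enumerate_cons]
    simp only [List.foldl_cons]
    by_cases hv : v > c
    · have hnot : (j0, i) ∉ vis := h j0 le_rfl
      have hadd : PySem.Set.add vis (j0, i) = vis ++ [(j0, i)] := by
        simp [PySem.Set.add, PySem.Set.contains, hnot]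
      rw [if_pos hv, hadd, innerA i rest v (j0 + 1) (vis ++ [(j0, i)]) ?_]
      · simp [sel, gmax, hv]
      · intro j hj hmem
        rcases List.mem_append.1 hmem with hmem | hmem
        · exact h j (by omega) hmem
        · simp at hmem; omega
    · rw [if_neg hv, innerA i rest c (j0 + 1) vis (fun j hj => h j (by omega))]
      simp [sel, gmax, hv]

-- the prefix-maxima array is a scanl
theorem pmScan : ∀ (col q : List Int) (c : Int),
    col.foldl
      (fun pm v =>
        pm ++ [if v > PySem.List.pyGetD pm (-1) 0 then v else PySem.List.pyGetD pm (-1) 0])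
      (q ++ [c])
    = q ++ List.scanl gmax c col
  | [], q, c => by simp
  | v :: rest, q, c => by
    rw [List.scanl_cons]
    simp only [List.foldl_cons]
    rw [PySem.List.pyGetD_neg_one_append_singleton, List.append_assoc]
    have := pmScan rest (q ++ [c]) (gmax c v)
    simpa [gmax, List.append_assoc] using this

-- B's filtered enumeration equals sel
theorem filtB (i : Int) : ∀ (col : List Int) (c j0 : Int),
    ((PySem.List.enumerate col j0).filter
        (fun p => p.2 > PySem.List.pyGetD (List.scanl gmax c col) (p.1 - j0) 0)).map
      (fun p => (p.1, i))
    = sel i col c j0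
  | [], _, _ => by simp [PySem.List.enumerate_nil, sel]
  | v :: rest, c, j0 => by
    rw [PySem.List.enumerate_cons]
    rw [List.scanl_cons]
    simp only [List.filter_cons]
    have hhead : PySem.List.pyGetD (c :: List.scanl gmax (gmax c v) rest) ((j0 : Int) - j0) 0 = c := by
      simp [PySem.List.pyGetD_zero_cons]
    have htail : ((PySem.List.enumerate rest (j0 + 1)).filter
        (fun p => p.2 > PySem.List.pyGetD (c :: List.scanl gmax (gmax c v) rest) (p.1 - j0) 0))
      = ((PySem.List.enumerate rest (j0 + 1)).filter
        (fun p => p.2 > PySem.List.pyGetD (List.scanl gmax (gmax c v) rest) (p.1 - (j0 + 1)) 0)) := by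
      apply List.filter_congr
      intro p hp
      rcases (PySem.List.mem_enumerate_iff _ _ _).1 hp with ⟨k, hk, rfl⟩
      have h1 : ((j0 + 1 + (k : Int)) - j0) = ((k : Int) + 1) := by omega
      have h2 : ((j0 + 1 + (k : Int)) - (j0 + 1)) = (k : Int) := by omega
      have h3 : PySem.List.pyGetD (c :: List.scanl gmax (gmax c v) rest) ((k : Int) + 1) 0
          = PySem.List.pyGetD (List.scanl gmax (gmax c v) rest) (k : Int) 0 := by
        rw [show ((k : Int) + 1) = ((k + 1 : Nat) : Int) by push_cast; ring,
            PySem.List.pyGetD_natCast, PySem.List.pyGetD_natCast]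
        simp
      rw [h1, h2, h3]
    have IH := filtB i rest (gmax c v) (j0 + 1)
    unfold sel
    rw [hhead, htail]
    by_cases hv : v > c
    · rw [if_pos (decide_eq_true hv), if_pos hv, List.map_cons, IH]
      simp [gmax, hv]
    · rw [if_neg (by simpa using hv), if_neg hv, IH]
      simp [gmax, hv]

-- updating a set with fresh, duplicate-free elements is appending
theorem update_append : ∀ (l s : List (Int × Int)),
    (∀ p ∈ l, p ∉ s) → l.Nodup → PySem.Set.update s l = s ++ l
  | [], s, _, _ => by simp [PySem.Set.update]
  | x :: l, s, h, hn => by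
    have hx : x ∉ s := h x (List.mem_cons_self ..)
    have hadd : PySem.Set.add s x = s ++ [x] := by
      simp [PySem.Set.add, PySem.Set.contains, hx]
    have : PySem.Set.update s (x :: l) = PySem.Set.update (PySem.Set.add s x) l := by
      simp [PySem.Set.update]
    rw [this, hadd, update_append l (s ++ [x]) ?_ (List.nodup_cons.1 hn).2]
    · simp
    · intro p hp hmem
      rcases List.mem_append.1 hmem with hm | hm
      · exact h p (List.mem_cons_of_mem _ hp) hm
      · simp at hm; exact (List.nodup_cons.1 hn).1 (hm ▸ hp)

-- enumerating a mapped list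
theorem enumerate_map {α β : Type} (f : α → β) : ∀ (xs : List α) (s : Int),
    PySem.List.enumerate (xs.map f) s = (PySem.List.enumerate xs s).map (fun p => (p.1, f p.2))
  | [], _ => by simp [PySem.List.enumerate_nil]
  | x :: xs, s => by
    rw [List.map_cons, PySem.List.enumerate_cons, PySem.List.enumerate_cons,
        enumerate_map f xs (s + 1)]
    simp

-- A's per-column body, characterised by sel
theorem stepA_sel (mat : List (List Int)) (i : Int) (vis : List (Int × Int))
    (h : ∀ p ∈ vis, p.2 < i) :
    ((PySem.List.pyRange 0 (mat.length : Int) 1).foldl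
        (fun (st : Int × List (Int × Int)) j =>
          let cur_val := PySem.List.pyGetD (PySem.List.pyGetD mat j []) i 0
          if cur_val > st.1 then (cur_val, PySem.Set.add st.2 (j, i)) else st)
        (-1, vis)).2
    = vis ++ sel i (mat.map (fun row => PySem.List.pyGetD row i 0)) (-1) 0 := by
  have hfresh : ∀ j : Int, (0 : Int) ≤ j → (j, i) ∉ vis := by
    intro j _ hmem; exact absurd (h _ hmem) (by simp)
  have hA : ((PySem.List.pyRange 0 (mat.length : Int) 1).foldl
        (fun (st : Int × List (Int × Int)) j =>
          let cur_val := PySem.List.pyGetD (PySem.List.pyGetD mat j []) i 0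
          if cur_val > st.1 then (cur_val, PySem.Set.add st.2 (j, i)) else st)
        (-1, vis))
      = ((PySem.List.enumerate (mat.map (fun row => PySem.List.pyGetD row i 0)) 0).foldl
        (fun (st : Int × List (Int × Int)) p =>
          if p.2 > st.1 then (p.2, PySem.Set.add st.2 (p.1, i)) else st)
        (-1, vis)) := by
    rw [enumerate_map, PySem.List.enumerate_eq_map_pyRange (d := ([] : List Int)),
        List.foldl_map, List.foldl_map]
    simp
  rw [hA, innerA i _ (-1) 0 vis hfresh]

-- B's per-column body, characterised by sel
theorem stepB_sel (mat : List (List Int)) (i : Int) (vis : List (Int × Int))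
    (h : ∀ p ∈ vis, p.2 < i) :
    (let col : List Int := mat.map (fun row => PySem.List.pyGetD row i 0)
     let pm : List Int := col.foldl
        (fun pm v =>
          pm ++ [if v > PySem.List.pyGetD pm (-1) 0 then v else PySem.List.pyGetD pm (-1) 0])
        [-1]
     PySem.Set.update vis
        (((PySem.List.enumerate col 0).filter (fun p => p.2 > PySem.List.pyGetD pm p.1 0)).map
          (fun p => (p.1, i))))
    = vis ++ sel i (mat.map (fun row => PySem.List.pyGetD row i 0)) (-1) 0 := by
  have hpm := pmScan (mat.map (fun row => PySem.List.pyGetD row i 0)) [] (-1)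
  simp only [List.nil_append] at hpm
  simp only [hpm]
  have hfilt : ((PySem.List.enumerate (mat.map (fun row => PySem.List.pyGetD row i 0)) 0).filter
      (fun p => p.2 > PySem.List.pyGetD
        (List.scanl gmax (-1) (mat.map (fun row => PySem.List.pyGetD row i 0))) p.1 0))
      = ((PySem.List.enumerate (mat.map (fun row => PySem.List.pyGetD row i 0)) 0).filter
      (fun p => p.2 > PySem.List.pyGetD
        (List.scanl gmax (-1) (mat.map (fun row => PySem.List.pyGetD row i 0))) (p.1 - 0) 0)) := by
    simp
  rw [hfilt, filtB i _ (-1) 0]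
  rw [update_append _ _ ?_ (nodup_sel _ _ _)]
  intro p hp hmem
  have h1 := (mem_sel hp).1
  have h2 := h p hmem
  omega

-- the outer column loop, with the invariant that vis only holds earlier columns
theorem outer_eq (mat : List (List Int)) (m : Int) :
    ∀ (k : Nat) (a : Int) (vis : List (Int × Int)), (m - a).toNat = k →
    (∀ p ∈ vis, p.2 < a) →
    (PySem.List.pyRange a m 1).foldl
      (fun visible i =>
        ((PySem.List.pyRange 0 (mat.length : Int) 1).foldl
          (fun (st : Int × List (Int × Int)) j =>
            let cur_val := PySem.List.pyGetD (PySem.List.pyGetD mat j []) i 0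
            if cur_val > st.1 then (cur_val, PySem.Set.add st.2 (j, i)) else st)
          (-1, visible)).2)
      vis
    = (PySem.List.pyRange a m 1).foldl
      (fun visible i =>
        let col : List Int := mat.map (fun row => PySem.List.pyGetD row i 0)
        let pm : List Int := col.foldl
          (fun pm v =>
            pm ++ [if v > PySem.List.pyGetD pm (-1) 0 then v else PySem.List.pyGetD pm (-1) 0])
          [-1]
        PySem.Set.update visible
          (((PySem.List.enumerate col 0).filter (fun p => p.2 > PySem.List.pyGetD pm p.1 0)).map
            (fun p => (p.1, i))))
      vis
  | 0, a, vis, hk, _ => by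
    rw [PySem.List.pyRange_one_eq_nil (show m ≤ a by omega)]
    rfl
  | k + 1, a, vis, hk, hinv => by
    rw [PySem.List.pyRange_one_cons (show a < m by omega)]
    simp only [List.foldl_cons]
    rw [stepA_sel mat a vis hinv, stepB_sel mat a vis hinv]
    apply outer_eq mat m k (a + 1) _ (by omega)
    intro p hp
    rcases List.mem_append.1 hp with hm | hm
    · have := hinv p hm; omega
    · have := (mem_sel hm).1; omega

-- ===== VERDICT (by name: the statement is the Claim_ definition above) =====
theorem find_all_visible_from_top_spec : Claim_equal_find_all_visible_from_top := by
  intro mat _ _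
  unfold Spec_find_all_visible_from_top find_all_visible_from_top find_all_visible_from_top_alt
  exact outer_eq mat _ _ 0 [] rfl (by simp)
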